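-- pv_equiv track=rewrite | github.com/luozi3/PotatoGallery | app/tagging.py | find_parent_cycles
-- ===== SOURCE A (Python) =====
-- from typing import Dict, List, Optional, Tuple
--
-- def find_parent_cycles(parent_map: Dict[str, List[str]]) -> List[str]:
--     visiting: set = set()
--     visited: set = set()
--     cycle: List[str] = []
--
--     def visit(node: str, stack: List[str]) -> bool:
--         if node in visiting:
--             cycle.extend(stack[stack.index(node) :])
--             return True
--         if node in visited:
--             return False
--         visiting.add(node)
--         stack.append(node)
--         for parent in parent_map.get(node, []):
--             if visit(parent, stack):
--                 return True
--         visiting.remove(node)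
--         visited.add(node)
--         stack.pop()
--         return False
--
--     for tag in parent_map:
--         if visit(tag, []):
--             break
--     return cycle
-- ===== SOURCE B (Python) =====
-- def find_parent_cycles(parent_map):
--     visited = set()
--     for tag in parent_map:
--         if tag in visited:
--             continue
--         visiting = {tag}
--         path = [tag]
--         stack = [(tag, 0)]
--         while stack:
--             node, i = stack[-1]
--             parents = parent_map.get(node, [])
--             if i < len(parents):
--                 stack[-1] = (node, i + 1)
--                 p = parents[i]
--                 if p in visiting:
--                     return path[path.index(p):]
--                 if p not in visited:
--                     visiting.add(p)
--                     path.append(p)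
--                     stack.append((p, 0))
--             else:
--                 stack.pop()
--                 visiting.discard(node)
--                 visited.add(node)
--                 path.pop()
--     return []
-- ===== Notes on version B (the rewrite author's own statement) =====
-- stated objective: alternative
-- what changed: A's recursive DFS (nested visit() calls with a shared visiting/visited set and a threaded stack) is replaced by an iterative DFS driven by an explicit stack of (node, next-parent-index) frames with a path list, reproducing the same left-to-right visit order and the same first cycle slice without recursion.
import Mathlib
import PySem

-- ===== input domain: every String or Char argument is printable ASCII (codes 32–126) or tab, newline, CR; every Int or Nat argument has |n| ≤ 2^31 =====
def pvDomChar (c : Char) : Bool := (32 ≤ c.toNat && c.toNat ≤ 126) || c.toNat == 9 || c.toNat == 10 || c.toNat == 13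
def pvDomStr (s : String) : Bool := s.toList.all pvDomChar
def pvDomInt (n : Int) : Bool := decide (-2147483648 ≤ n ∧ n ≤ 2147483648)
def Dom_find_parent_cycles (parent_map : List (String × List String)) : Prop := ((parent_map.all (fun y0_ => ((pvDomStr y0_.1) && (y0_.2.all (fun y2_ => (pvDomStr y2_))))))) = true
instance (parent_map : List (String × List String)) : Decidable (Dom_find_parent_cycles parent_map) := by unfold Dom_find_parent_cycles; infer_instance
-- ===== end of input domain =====

-- B replaces A's recursive DFS by an iterative DFS with an explicit frame stack (same visit order,
-- same first cycle); objective: alternative decomposition, no speed claim.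

-- ===== PORT A =====
-- A's state (visiting, visited, cycle); the recursion of Python A's `visit` is ported with a
-- depth-fuel artifact (Python has none): fuel is consumed only when a node is pushed, so it bounds
-- the recursion depth; the port is called with fuel larger than any reachable depth, so the
-- fuel-exhaustion branch is unreachable (this is a consequence of the equivalence proof below,
-- which only ever needs `fuel ≥ |keys ∪ parents| + 1` at each push).
def pvUniv (d : PySem.Dict String (List String)) : List String :=
  PySem.Dict.keys d ++ (PySem.Dict.values d).flatten

mutual
-- `visit(node, stack)`: returns (found, stack, (visiting, visited, cycle))
def pvVisitA (d : PySem.Dict String (List String)) :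
    Nat → String → List String →
    PySem.Set String × PySem.Set String × List String →
    Bool × List String × (PySem.Set String × PySem.Set String × List String)
  | fuel, node, stack, (vg, vd, cyc) =>
    if node ∈ vg then
      -- cycle.extend(stack[stack.index(node):]); index? = none is Python's ValueError, unreachable
      (true, stack,
        (vg, vd, cyc ++ (match PySem.List.index? stack node with
                         | some j => PySem.List.slice stack (some (j : Int)) none
                         | none => [])))
    else if node ∈ vd then (false, stack, (vg, vd, cyc))
    else
      match fuel with
      | 0 => (false, stack, (vg, vd, cyc))  -- fuel artifact, unreachable (see comment above)
      | f + 1 =>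
        pvVisitLoopA d f (PySem.Dict.getD d node []) node (stack ++ [node])
          (PySem.Set.add vg node, vd, cyc)
termination_by fuel _ _ _ => (fuel, 0)

-- the `for parent in parent_map.get(node, [])` loop, then the epilogue of `visit`
def pvVisitLoopA (d : PySem.Dict String (List String)) :
    Nat → List String → String → List String →
    PySem.Set String × PySem.Set String × List String →
    Bool × List String × (PySem.Set String × PySem.Set String × List String)
  | _, [], node, stack, (vg, vd, cyc) =>
      -- visiting.remove(node) (KeyError = none, unreachable); visited.add(node); stack.pop()
      (false, stack.dropLast,
        ((match PySem.Set.remove? vg node with | some s => s | none => vg),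
         PySem.Set.add vd node, cyc))
  | f, p :: ps, node, stack, st =>
      match pvVisitA d f p stack st with
      | (true, stack', st') => (true, stack', st')
      | (false, stack', st') => pvVisitLoopA d f ps node stack' st'
termination_by f ps _ _ _ => (f, ps.length + 1)
end

-- `for tag in parent_map: if visit(tag, []): break` then `return cycle`
def pvOuterA (d : PySem.Dict String (List String)) (K : Nat) :
    List String → PySem.Set String × PySem.Set String × List String → List String
  | [], (_, _, cyc) => cyc
  | t :: ts, st =>
    match pvVisitA d K t [] st with
    | (true, _, (_, _, cyc')) => cyc'
    | (false, _, st') => pvOuterA d K ts st'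

def find_parent_cycles (parent_map : List (String × List String)) : List String :=
  let d := PySem.Dict.ofList parent_map
  pvOuterA d ((pvUniv d).length + 2) (PySem.Dict.keys d)
    (PySem.Set.empty, PySem.Set.empty, [])

-- ===== PORT B =====
-- termination helpers for the iterative machine (proof devices, not part of B's algorithm):
-- every string a frame can push lies in pvUniv, so pushes strictly shrink the untouched part of
-- the universe; skip/pop steps shrink the total remaining work of the frame stack.
def pvKr (d : PySem.Dict String (List String)) (vg vd : PySem.Set String) : Nat :=
  ((pvUniv d).toFinset \ (vg.toFinset ∪ vd.toFinset)).card

def pvSz (d : PySem.Dict String (List String)) (frames : List (String × Nat)) : Nat :=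
  (frames.map (fun f => (PySem.Dict.getD d f.1 []).length - f.2 + 1)).sum

lemma pvMemUniv (d : PySem.Dict String (List String)) {node : String} {i : Nat}
    (h : i < (PySem.Dict.getD d node []).length) :
    (PySem.Dict.getD d node [])[i] ∈ pvUniv d := by
  rcases hg : PySem.Dict.get? d node with _ | v
  · rw [PySem.Dict.getD_of_get?_eq_none _ _ hg] at h; simp at h
  · have hv : v ∈ PySem.Dict.values d := by
      have := PySem.Dict.mem_items_of_get?_eq_some d hg
      simp only [PySem.Dict.values]
      exact List.mem_map.mpr ⟨(node, v), this, rfl⟩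
    have hgd : PySem.Dict.getD d node [] = v := PySem.Dict.getD_of_get?_eq_some _ _ hg
    simp only [hgd] at h ⊢
    exact List.mem_append.mpr (Or.inr (List.mem_flatten.mpr ⟨v, hv, List.getElem_mem h⟩))

lemma pvKr_push (d : PySem.Dict String (List String)) {vg vd : PySem.Set String} {p : String}
    (hu : p ∈ pvUniv d) (h1 : p ∉ vg) (h2 : p ∉ vd) :
    pvKr d (PySem.Set.add vg p) vd < pvKr d vg vd := by
  apply Finset.card_lt_card
  have hadd : (PySem.Set.add vg p : List String) = vg ++ [p] := PySem.Set.add_of_not_mem h1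
  constructor
  · intro x hx
    simp only [hadd, Finset.mem_sdiff, Finset.mem_union, List.mem_toFinset, List.mem_append,
      List.mem_singleton] at hx ⊢
    tauto
  · intro hsub
    have hp : p ∈ (pvUniv d).toFinset \ (vg.toFinset ∪ vd.toFinset) := by
      simp [List.mem_toFinset, hu, h1, h2]
    have := hsub hp
    simp [hadd, List.mem_toFinset] at this

lemma pvKr_pop (d : PySem.Dict String (List String)) (vg vd : PySem.Set String) (node : String) :
    pvKr d (PySem.Set.discard vg node) (PySem.Set.add vd node) ≤ pvKr d vg vd := by
  apply Finset.card_le_card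
  intro x hx
  simp only [Finset.mem_sdiff, Finset.mem_union, List.mem_toFinset] at hx ⊢
  refine ⟨hx.1, ?_⟩
  have h2 := hx.2
  rw [PySem.Set.mem_discard, PySem.Set.mem_add] at h2
  by_cases hxn : x = node <;> tauto

-- the `while stack:` loop of B; frames head = top of stack; returns (cycle-or-None, path, visiting, visited)
def pvLoopB (d : PySem.Dict String (List String)) :
    List (String × Nat) → List String → PySem.Set String → PySem.Set String →
    Option (List String) × List String × PySem.Set String × PySem.Set String
  | [], path, vg, vd => (none, path, vg, vd)
  | (node, i) :: rest, path, vg, vd =>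
    if h : i < (PySem.Dict.getD d node []).length then
      if (PySem.Dict.getD d node [])[i] ∈ vg then
        (some (match PySem.List.index? path (PySem.Dict.getD d node [])[i] with
               | some j => PySem.List.slice path (some (j : Int)) none
               | none => []), path, vg, vd)
      else if (PySem.Dict.getD d node [])[i] ∈ vd then
        pvLoopB d ((node, i + 1) :: rest) path vg vd
      else
        pvLoopB d (((PySem.Dict.getD d node [])[i], 0) :: (node, i + 1) :: rest) (path ++ [(PySem.Dict.getD d node [])[i]])
          (PySem.Set.add vg (PySem.Dict.getD d node [])[i]) vd
    else
      pvLoopB d rest path.dropLast (PySem.Set.discard vg node) (PySem.Set.add vd node)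
termination_by frames _ vg vd => (pvKr d vg vd, pvSz d frames)
decreasing_by
  · apply Prod.Lex.right
    simp only [pvSz, List.map_cons, List.sum_cons]
    omega
  · exact Prod.Lex.left _ _ (pvKr_push d (pvMemUniv d h) (by assumption) (by assumption))
  · rcases lt_or_eq_of_le (pvKr_pop d vg vd node) with hlt | heq
    · exact Prod.Lex.left _ _ hlt
    · rw [heq]
      apply Prod.Lex.right
      simp only [pvSz, List.map_cons, List.sum_cons]
      omega

-- the `for tag in parent_map:` loop of B
def pvOuterB (d : PySem.Dict String (List String)) :
    List String → PySem.Set String → List String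
  | [], _ => []
  | t :: ts, vd =>
    if t ∈ vd then pvOuterB d ts vd
    else
      match pvLoopB d [(t, 0)] [t] (PySem.Set.add PySem.Set.empty t) vd with
      | (some c, _, _, _) => c
      | (none, _, _, vd') => pvOuterB d ts vd'

def find_parent_cycles_alt (parent_map : List (String × List String)) : List String :=
  let d := PySem.Dict.ofList parent_map
  pvOuterB d (PySem.Dict.keys d) PySem.Set.empty

-- ===== PRECONDITION & SPEC =====
def Spec_find_parent_cycles (parent_map : List (String × List String)) (out : List String) : Prop := out = find_parent_cycles_alt parent_map
instance (parent_map : List (String × List String)) (out : List String) : Decidable (Spec_find_parent_cycles parent_map out) := by unfold Spec_find_parent_cycles; infer_instance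

-- ===== CLAIM (what is proved, stated in full; the proofs are below) =====
def Claim_equal_find_parent_cycles : Prop := ∀ (parent_map : List (String × List String)), Dom_find_parent_cycles parent_map → Spec_find_parent_cycles parent_map (find_parent_cycles parent_map)

-- ===== LEMMAS AND PROOFS =====

-- A's recursion continuation as a list of pending loop frames: runA fuel [(n₁,ps₁),…] is
-- "finish the loop over ps₁ inside visit(n₁) at depth-fuel `fuel`, then ps₂ at fuel+1, …".
def pvRunA (d : PySem.Dict String (List String)) :
    Nat → List (String × List String) → List String →
    PySem.Set String × PySem.Set String × List String →
    Bool × List String × (PySem.Set String × PySem.Set String × List String)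
  | _, [], path, st => (false, path, st)
  | fuel, (n, ps) :: fr, path, st =>
    match pvVisitLoopA d fuel ps n path st with
    | (true, p', st') => (true, p', st')
    | (false, p', st') => pvRunA d (fuel + 1) fr p' st'

def pvToA (d : PySem.Dict String (List String)) (f : String × Nat) : String × List String :=
  (f.1, (PySem.Dict.getD d f.1 []).drop f.2)


-- the inline `stack[stack.index(node):]` expression of both ports, named for the proofs
def pvSlice (path : List String) (p : String) : List String :=
  match PySem.List.index? path p with
  | some j => PySem.List.slice path (some (j : Int)) none
  | none => []

lemma pvRemove_eq (vg : PySem.Set String) (node : String) :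
    (match PySem.Set.remove? vg node with | some s => s | none => vg) =
      PySem.Set.discard vg node := by
  by_cases h : node ∈ vg
  · simp [PySem.Set.remove?, h]
  · have hd : PySem.Set.discard vg node = vg := by
      simp only [PySem.Set.discard]
      apply List.filter_eq_self.mpr
      intro a ha
      have hne : a ≠ node := fun e => h (e ▸ ha)
      simp [hne]
    simp [PySem.Set.remove?, h, hd]

lemma pvVisitA_found (d : PySem.Dict String (List String)) (fuel : Nat) {node : String}
    {vg : PySem.Set String} (h : node ∈ vg) (stack : List String) (vd : PySem.Set String)
    (cyc : List String) :
    pvVisitA d fuel node stack (vg, vd, cyc) =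
      (true, stack, (vg, vd, cyc ++ pvSlice stack node)) := by
  rw [pvVisitA.eq_def]
  simp [h, pvSlice]

lemma pvVisitA_visited (d : PySem.Dict String (List String)) (fuel : Nat) {node : String}
    {vg vd : PySem.Set String} (h1 : node ∉ vg) (h2 : node ∈ vd) (stack : List String)
    (cyc : List String) :
    pvVisitA d fuel node stack (vg, vd, cyc) = (false, stack, (vg, vd, cyc)) := by
  rw [pvVisitA.eq_def]
  simp [h1, h2]

lemma pvVisitA_push (d : PySem.Dict String (List String)) (f : Nat) {node : String}
    {vg vd : PySem.Set String} (h1 : node ∉ vg) (h2 : node ∉ vd) (stack : List String)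
    (cyc : List String) :
    pvVisitA d (f + 1) node stack (vg, vd, cyc) =
      pvVisitLoopA d f (PySem.Dict.getD d node []) node (stack ++ [node])
        (PySem.Set.add vg node, vd, cyc) := by
  rw [pvVisitA.eq_def]
  simp [h1, h2]

lemma pvVisitLoopA_nil (d : PySem.Dict String (List String)) (f : Nat) (node : String)
    (stack : List String) (vg vd : PySem.Set String) (cyc : List String) :
    pvVisitLoopA d f [] node stack (vg, vd, cyc) =
      (false, stack.dropLast, (PySem.Set.discard vg node, PySem.Set.add vd node, cyc)) := by
  rw [pvVisitLoopA, pvRemove_eq]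

lemma pvRunA_nil (d : PySem.Dict String (List String)) (fuel : Nat) (path : List String)
    (st : PySem.Set String × PySem.Set String × List String) :
    pvRunA d fuel [] path st = (false, path, st) := by
  rw [pvRunA]

lemma pvRunA_cons (d : PySem.Dict String (List String)) (fuel : Nat) (n : String)
    (ps : List String) (fr : List (String × List String)) (path : List String)
    (st : PySem.Set String × PySem.Set String × List String) :
    pvRunA d fuel ((n, ps) :: fr) path st =
      match pvVisitLoopA d fuel ps n path st with
      | (true, p', st') => (true, p', st')
      | (false, p', st') => pvRunA d (fuel + 1) fr p' st' := by
  rw [pvRunA]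

lemma pvRunA_found (d : PySem.Dict String (List String)) (fuel : Nat) {p : String}
    {vg : PySem.Set String} (h : p ∈ vg) (n : String) (ps : List String)
    (fr : List (String × List String)) (path : List String) (vd : PySem.Set String)
    (cyc : List String) :
    pvRunA d fuel ((n, p :: ps) :: fr) path (vg, vd, cyc) =
      (true, path, (vg, vd, cyc ++ pvSlice path p)) := by
  rw [pvRunA_cons, pvVisitLoopA, pvVisitA_found d fuel h]

lemma pvRunA_skip (d : PySem.Dict String (List String)) (fuel : Nat) {p : String}
    {vg vd : PySem.Set String} (h1 : p ∉ vg) (h2 : p ∈ vd) (n : String) (ps : List String)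
    (fr : List (String × List String)) (path : List String) (cyc : List String) :
    pvRunA d fuel ((n, p :: ps) :: fr) path (vg, vd, cyc) =
      pvRunA d fuel ((n, ps) :: fr) path (vg, vd, cyc) := by
  rw [pvRunA_cons, pvVisitLoopA, pvVisitA_visited d fuel h1 h2, pvRunA_cons]

lemma pvRunA_push (d : PySem.Dict String (List String)) (f : Nat) {p : String}
    {vg vd : PySem.Set String} (h1 : p ∉ vg) (h2 : p ∉ vd) (n : String) (ps : List String)
    (fr : List (String × List String)) (path : List String) (cyc : List String) :
    pvRunA d (f + 1) ((n, p :: ps) :: fr) path (vg, vd, cyc) =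
      pvRunA d f ((p, PySem.Dict.getD d p []) :: (n, ps) :: fr) (path ++ [p])
        (PySem.Set.add vg p, vd, cyc) := by
  rw [pvRunA_cons, pvVisitLoopA, pvVisitA_push d f h1 h2]
  rcases hX : pvVisitLoopA d f (PySem.Dict.getD d p []) p (path ++ [p])
      (PySem.Set.add vg p, vd, cyc) with ⟨b, p', st''⟩
  rw [pvRunA_cons, hX]
  cases b
  · simp only [pvRunA_cons]
  · rfl

lemma pvRunA_pop (d : PySem.Dict String (List String)) (fuel : Nat) (n : String)
    (fr : List (String × List String)) (path : List String) (vg vd : PySem.Set String)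
    (cyc : List String) :
    pvRunA d fuel ((n, []) :: fr) path (vg, vd, cyc) =
      pvRunA d (fuel + 1) fr path.dropLast
        (PySem.Set.discard vg n, PySem.Set.add vd n, cyc) := by
  rw [pvRunA_cons, pvVisitLoopA_nil]

theorem pvSim (d : PySem.Dict String (List String)) :
    ∀ (frames : List (String × Nat)) (path : List String) (vg vd : PySem.Set String)
      (fuel : Nat), pvKr d vg vd + 1 ≤ fuel →
      pvRunA d fuel (frames.map (pvToA d)) path (vg, vd, []) =
        ((pvLoopB d frames path vg vd).1.isSome, (pvLoopB d frames path vg vd).2.1,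
          ((pvLoopB d frames path vg vd).2.2.1, (pvLoopB d frames path vg vd).2.2.2,
            (pvLoopB d frames path vg vd).1.getD [])) := by
  intro frames path vg vd
  fun_induction pvLoopB d frames path vg vd with
  | case1 path vg vd =>
    intro fuel hf
    simp [pvRunA_nil]
  | case2 node i rest path vg vd hlt hmem =>
    intro fuel hf
    simp only [List.map_cons, pvToA]
    rw [List.drop_eq_getElem_cons hlt, pvRunA_found d fuel hmem]
    simp [pvSlice]
  | case3 node i rest path vg vd hlt h1 h2 ih =>
    intro fuel hf
    simp only [List.map_cons, pvToA] at ih ⊢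
    rw [List.drop_eq_getElem_cons hlt, pvRunA_skip d fuel h1 h2]
    exact ih fuel hf
  | case4 node i rest path vg vd hlt h1 h2 ih =>
    intro fuel hf
    obtain ⟨f, rfl⟩ : ∃ f, fuel = f + 1 := ⟨fuel - 1, by omega⟩
    simp only [List.map_cons, pvToA] at ih ⊢
    rw [List.drop_eq_getElem_cons hlt, pvRunA_push d f h1 h2]
    have hkr := pvKr_push d (pvMemUniv d hlt) h1 h2
    have := ih f (by omega)
    simpa [List.drop_zero] using this
  | case5 node i rest path vg vd hlt ih =>
    intro fuel hf
    simp only [List.map_cons, pvToA] at ih ⊢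
    rw [List.drop_eq_nil_of_le (by omega), pvRunA_pop]
    have hkr := pvKr_pop d vg vd node
    exact ih (fuel + 1) (by omega)

lemma pvDiscard_add {vg : PySem.Set String} {p : String} (h : p ∉ vg) :
    PySem.Set.discard (PySem.Set.add vg p) p = vg := by
  rw [PySem.Set.add_of_not_mem h]
  simp only [PySem.Set.discard, List.filter_append]
  have hself : vg.filter (fun y => !y == p) = vg :=
    List.filter_eq_self.mpr (fun a ha => by
      have hne : a ≠ p := fun e => h (e ▸ ha)
      simp [hne])
  simp [hself]

lemma pvVisitA_top (d : PySem.Dict String (List String)) (k : Nat) {t : String}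
    {vg vd : PySem.Set String} (h1 : t ∉ vg) (h2 : t ∉ vd) (cyc : List String) :
    pvVisitA d (k + 1) t [] (vg, vd, cyc) =
      pvRunA d k [(t, PySem.Dict.getD d t [])] [t] (PySem.Set.add vg t, vd, cyc) := by
  rw [pvVisitA_push d k h1 h2, pvRunA_cons]
  rcases hX : pvVisitLoopA d k (PySem.Dict.getD d t []) t [t]
      (PySem.Set.add vg t, vd, cyc) with ⟨b, p', st'⟩
  simp only [List.nil_append]
  rw [hX]
  cases b
  · show (false, p', st') = pvRunA d (k + 1) [] p' st'
    rw [pvRunA_nil]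
  · rfl

theorem pvRestore (d : PySem.Dict String (List String)) :
    ∀ (frames : List (String × Nat)) (path : List String) (vg vd : PySem.Set String),
      (pvLoopB d frames path vg vd).1 = none →
      (pvLoopB d frames path vg vd).2.2.1 =
        frames.foldl (fun s f => PySem.Set.discard s f.1) vg := by
  intro frames path vg vd
  fun_induction pvLoopB d frames path vg vd with
  | case1 path vg vd => intro _; rfl
  | case2 node i rest path vg vd hlt hmem => intro h; simp at h
  | case3 node i rest path vg vd hlt h1 h2 ih =>
    intro h
    rw [ih h]
    simp only [List.foldl_cons]
  | case4 node i rest path vg vd hlt h1 h2 ih =>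
    intro h
    rw [ih h]
    simp only [List.foldl_cons, pvDiscard_add h1]
  | case5 node i rest path vg vd hlt ih =>
    intro h
    rw [ih h]
    simp only [List.foldl_cons]

theorem pvOuter (d : PySem.Dict String (List String)) :
    ∀ (tags : List String) (vd : PySem.Set String),
      pvOuterA d ((pvUniv d).length + 2) tags (PySem.Set.empty, vd, []) =
        pvOuterB d tags vd := by
  intro tags
  induction tags with
  | nil => intro vd; rfl
  | cons t ts ih =>
    intro vd
    by_cases hvd : t ∈ vd
    · rw [pvOuterA, pvOuterB]
      have hA := pvVisitA_visited d ((pvUniv d).length + 2)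
        (show t ∉ PySem.Set.empty by simp [PySem.Set.empty]) hvd [] []
      rw [hA]
      simp only [hvd, if_true]
      exact ih vd
    · have hnv : t ∉ (PySem.Set.empty : PySem.Set String) := by simp [PySem.Set.empty]
      have hbound : pvKr d (PySem.Set.add PySem.Set.empty t) vd + 1 ≤ (pvUniv d).length + 1 := by
        have h1 : pvKr d (PySem.Set.add PySem.Set.empty t) vd ≤ (pvUniv d).toFinset.card :=
          Finset.card_le_card Finset.sdiff_subset
        have h2 : (pvUniv d).toFinset.card ≤ (pvUniv d).length := List.toFinset_card_le _
        omega
      have hS := pvSim d [(t, 0)] [t] (PySem.Set.add PySem.Set.empty t) vd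
        ((pvUniv d).length + 1) hbound
      simp only [List.map_cons, List.map_nil, pvToA, List.drop_zero] at hS
      have htop := pvVisitA_top d ((pvUniv d).length + 1) hnv hvd []
      have hKeq : (pvUniv d).length + 2 = ((pvUniv d).length + 1) + 1 := rfl
      rw [pvOuterA, pvOuterB, hKeq, htop, hS]
      simp only [hvd, if_false]
      rcases hL : pvLoopB d [(t, 0)] [t] (PySem.Set.add PySem.Set.empty t) vd with
        ⟨copt, p', vg', vd'⟩
      rcases copt with _ | c
      · have hres := pvRestore d [(t, 0)] [t] (PySem.Set.add PySem.Set.empty t) vd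
          (by rw [hL])
        rw [hL] at hres
        simp only [List.foldl_cons, List.foldl_nil, pvDiscard_add hnv] at hres
        simp only [Option.isSome_none, Option.getD_none]
        rw [hres]
        exact ih vd'
      · simp only [Option.isSome_some, Option.getD_some]

theorem find_parent_cycles_spec : Claim_equal_find_parent_cycles := by
  intro pm _
  unfold Spec_find_parent_cycles find_parent_cycles find_parent_cycles_alt
  exact pvOuter (PySem.Dict.ofList pm) (PySem.Dict.keys (PySem.Dict.ofList pm)) PySem.Set.empty
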